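-- pv_equiv track=rewrite | github.com/dhatricds/Medina | src/medina/schedule/ocr_extractor.py | _find_first_data_line
-- ===== SOURCE A (Python) =====
-- def _find_first_data_line(lines: list[str], first_code_idx: int) -> int:
--     """Find the first data line (after headers, before first code)."""
--     # Walk backwards from first code line to find description start.
--     start = 0
--     for i in range(first_code_idx - 1, -1, -1):
--         line = lines[i].strip().upper()
--         if not line:
--             start = i + 1
--             break
--         # Stop at header keywords.
--         if any(kw in line for kw in ("DESCRIPTION", "VOLTAGE", "TYPE", "SCHEDULE", "QTY")):
--             start = i + 1
--             break
--     return start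
-- ===== SOURCE B (Python) =====
-- def _find_first_data_line(lines: list[str], first_code_idx: int) -> int:
--     """Find the first data line (after headers, before first code)."""
--     # Forward scan: keep the index just after the LAST blank/keyword line
--     # seen before the first code line.
--     start = 0
--     for i in range(0, first_code_idx):
--         line = lines[i].strip().upper()
--         if not line or any(kw in line for kw in ("DESCRIPTION", "VOLTAGE", "TYPE", "SCHEDULE", "QTY")):
--             start = i + 1
--     return start
-- ===== Notes on version B (the rewrite author's own statement) =====
-- stated objective: alternative
-- what changed: Backward scan with break at the first blank/keyword line is replaced by a full forward scan that keeps the index after the last blank/keyword line; the reversal argument (first hit backwards = last hit forwards) is proved.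
import Mathlib
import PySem

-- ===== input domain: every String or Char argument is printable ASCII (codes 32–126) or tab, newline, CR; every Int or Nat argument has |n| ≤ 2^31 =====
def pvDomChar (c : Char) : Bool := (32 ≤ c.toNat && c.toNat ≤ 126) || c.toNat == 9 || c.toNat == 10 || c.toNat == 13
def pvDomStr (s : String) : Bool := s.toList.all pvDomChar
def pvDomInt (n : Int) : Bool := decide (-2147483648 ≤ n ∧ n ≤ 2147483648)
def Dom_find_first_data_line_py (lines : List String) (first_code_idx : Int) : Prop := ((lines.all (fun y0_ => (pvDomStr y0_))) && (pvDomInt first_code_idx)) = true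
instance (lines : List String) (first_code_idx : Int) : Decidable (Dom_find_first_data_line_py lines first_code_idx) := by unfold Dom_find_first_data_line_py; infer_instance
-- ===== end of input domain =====

-- B replaces A's backward scan with break by a forward scan keeping the last blank/keyword hit (alternative decomposition, same cost).

-- ===== PORT A =====
-- A walks indices first_code_idx-1, …, 0 and returns i+1 at the first blank or keyword line (break), else 0.
def pvKwsA : List String := ["DESCRIPTION", "VOLTAGE", "TYPE", "SCHEDULE", "QTY"]

def pvLoopA (lines : List String) : List Int → Int
  | [] => 0
  | i :: rest =>
    match PySem.List.pyGet? lines i with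
    | none => 0   -- Python raises IndexError here; excluded by Pre_
    | some s =>
      let line := PySem.Str.upper (PySem.Str.strip s)
      if PySem.Str.len line = 0 then i + 1
      else if pvKwsA.any (fun kw => PySem.Str.isIn kw line) then i + 1
      else pvLoopA lines rest

def find_first_data_line_py (lines : List String) (first_code_idx : Int) : Int :=
  pvLoopA lines (PySem.List.pyRange (first_code_idx - 1) (-1) (-1))

-- ===== PORT B =====
def pvKwsB : List String := ["DESCRIPTION", "VOLTAGE", "TYPE", "SCHEDULE", "QTY"]

def find_first_data_line_py_alt (lines : List String) (first_code_idx : Int) : Int :=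
  (PySem.List.pyRange 0 first_code_idx 1).foldl
    (fun start i =>
      match PySem.List.pyGet? lines i with
      | none => start   -- Python raises IndexError here; excluded by Pre_
      | some s =>
        let line := PySem.Str.upper (PySem.Str.strip s)
        if PySem.Str.len line = 0 || pvKwsB.any (fun kw => PySem.Str.isIn kw line) then i + 1
        else start)
    0

-- ===== PRECONDITION & SPEC =====
-- Pre_ excludes first_code_idx > len(lines), where the Python A raises IndexError at lines[first_code_idx-1].
def Pre_find_first_data_line_py (lines : List String) (first_code_idx : Int) : Prop :=
  first_code_idx ≤ (lines.length : Int)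
instance (lines : List String) (first_code_idx : Int) : Decidable (Pre_find_first_data_line_py lines first_code_idx) := by unfold Pre_find_first_data_line_py; infer_instance

def pvWitness_find_first_data_line_py : List String × Int := (["SCHEDULE", "motor 5", "pump 2", "CODE"], 3)

def Spec_find_first_data_line_py (lines : List String) (first_code_idx : Int) (out : Int) : Prop := out = find_first_data_line_py_alt lines first_code_idx
instance (lines : List String) (first_code_idx : Int) (out : Int) : Decidable (Spec_find_first_data_line_py lines first_code_idx out) := by unfold Spec_find_first_data_line_py; infer_instance

-- ===== CLAIM (what is proved, stated in full; the proofs are below) =====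
def Claim_equal_find_first_data_line_py : Prop := ∀ (lines : List String) (first_code_idx : Int), Dom_find_first_data_line_py lines first_code_idx → Pre_find_first_data_line_py lines first_code_idx → Spec_find_first_data_line_py lines first_code_idx (find_first_data_line_py lines first_code_idx)

-- ===== LEMMAS AND PROOFS =====

-- first hit scanning a reversed index list = last hit scanning forward
theorem pvLoopA_eq_foldl (lines : List String) (l : List Int)
    (h : ∀ i ∈ l, (PySem.List.pyGet? lines i).isSome) :
    pvLoopA lines l =
      l.reverse.foldl
        (fun start i =>
          match PySem.List.pyGet? lines i with
          | none => start
          | some s =>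
            let line := PySem.Str.upper (PySem.Str.strip s)
            if PySem.Str.len line = 0 || pvKwsB.any (fun kw => PySem.Str.isIn kw line) then i + 1
            else start)
        0 := by
  induction l with
  | nil => simp [pvLoopA]
  | cons i rest ih =>
    have hi : (PySem.List.pyGet? lines i).isSome := h i (by simp)
    obtain ⟨s, hs⟩ := Option.isSome_iff_exists.mp hi
    have ihr := ih (fun j hj => h j (by simp [hj]))
    simp only [pvLoopA, List.reverse_cons, List.foldl_append, List.foldl_cons, List.foldl_nil, hs, ihr]
    simp only [pvKwsA, pvKwsB]
    split_ifs with h1 h2 <;> simp_all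

theorem find_first_data_line_py_spec : Claim_equal_find_first_data_line_py := by
  intro lines fci _ hpre
  unfold Spec_find_first_data_line_py find_first_data_line_py find_first_data_line_py_alt
  have hrev : PySem.List.pyRange (fci - 1) (-1) (-1) = (PySem.List.pyRange 0 fci 1).reverse := by
    rw [PySem.List.pyRange_neg_one_eq_reverse]
    norm_num
  rw [hrev, pvLoopA_eq_foldl, List.reverse_reverse]
  intro i hi
  rw [List.mem_reverse, PySem.List.mem_pyRange_one] at hi
  have hlt : i.toNat < lines.length := by
    unfold Pre_find_first_data_line_py at hpre; omega
  simp [PySem.List.pyGet?_of_nonneg lines hi.1, hlt]
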